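-- pv_equiv track=rewrite | github.com/bareyan/EduViz | backend/app/services/diff_correction/applier.py | perfect_replace
-- ===== SOURCE A (Python) =====
-- from typing import Optional, List, Tuple
--
-- def perfect_replace(whole_lines: List[str], part_lines: List[str], replace_lines: List[str]) -> Optional[str]:
--     """
--     Try to find an exact match of part_lines in whole_lines and replace.
--
--     Returns:
--         The modified content if match found, None otherwise
--     """
--     part_tup = tuple(part_lines)
--     part_len = len(part_lines)
--
--     for i in range(len(whole_lines) - part_len + 1):
--         whole_tup = tuple(whole_lines[i : i + part_len])
--         if part_tup == whole_tup:
--             res = whole_lines[:i] + replace_lines + whole_lines[i + part_len :]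
--             return "".join(res)
--
--     return None
-- ===== SOURCE B (Python) =====
-- from typing import Optional, List
--
--
-- def perfect_replace(whole_lines: List[str], part_lines: List[str], replace_lines: List[str]) -> Optional[str]:
--     """Rabin-Karp style search: a rolling additive signature (sum of window line
--     lengths) of the current
--     window filters candidate positions; only on a signature hit is the window
--     compared line by line.  First (leftmost) confirmed match is spliced."""
--     part_len = len(part_lines)
--     if part_len > len(whole_lines):
--         return None
--     sig = len
--     target = sum(sig(s) for s in part_lines)
--     sigs = [sig(s) for s in whole_lines]
--     h = sum(sigs[:part_len])
--     i = 0
--     shifts = iter(zip(sigs, sigs[part_len:]))  # (signature leaving, signature entering) per shift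
--     while True:
--         if h == target and whole_lines[i : i + part_len] == part_lines:
--             return "".join(whole_lines[:i] + replace_lines + whole_lines[i + part_len :])
--         nxt = next(shifts, None)
--         if nxt is None:
--             return None
--         out_sig, in_sig = nxt
--         h += in_sig - out_sig
--         i += 1
-- ===== Notes on version B (the rewrite author's own statement) =====
-- stated objective: alternative
-- what changed: Replaces A's per-position window slicing-and-comparison by a Rabin-Karp-style scan: a rolling additive signature (the sum of the window's line lengths) is updated per shift and the full window comparison runs only on a signature hit.
import Mathlib
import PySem

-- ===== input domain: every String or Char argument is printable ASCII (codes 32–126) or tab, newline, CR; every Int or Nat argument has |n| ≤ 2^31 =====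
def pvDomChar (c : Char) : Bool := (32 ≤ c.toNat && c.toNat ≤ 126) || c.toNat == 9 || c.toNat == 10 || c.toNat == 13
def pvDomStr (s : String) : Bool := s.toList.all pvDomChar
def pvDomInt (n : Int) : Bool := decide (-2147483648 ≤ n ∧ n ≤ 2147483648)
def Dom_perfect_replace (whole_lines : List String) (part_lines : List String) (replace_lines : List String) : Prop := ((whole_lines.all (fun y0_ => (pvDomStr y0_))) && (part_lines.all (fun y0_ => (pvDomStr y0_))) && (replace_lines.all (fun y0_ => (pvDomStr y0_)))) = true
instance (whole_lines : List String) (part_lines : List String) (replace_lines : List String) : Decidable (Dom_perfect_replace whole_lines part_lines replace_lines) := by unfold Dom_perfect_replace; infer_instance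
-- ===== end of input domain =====

-- B replaces A's per-position window comparison by a Rabin–Karp-style rolling additive
-- signature that filters candidate positions; a full window comparison runs only on a
-- signature hit (objective: alternative algorithm, same worst-case cost).

-- ===== PORT A =====
-- the for-loop with early return, as recursion over the range list; Python's tuple
-- comparison of the two windows is elementwise, ported as list equality
def pvAGo (whole part repl : List String) : List Int → Option String
  | [] => none
  | i :: rest =>
      if PySem.List.slice whole (some i) (some (i + (part.length : Int))) = part then
        some (PySem.Str.join "" (PySem.List.slice whole none (some i) ++ repl ++
          PySem.List.slice whole (some (i + (part.length : Int))) none))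
      else pvAGo whole part repl rest

def perfect_replace (whole_lines : List String) (part_lines : List String) (replace_lines : List String) : Option String :=
  pvAGo whole_lines part_lines replace_lines
    (PySem.List.pyRange 0 ((whole_lines.length : Int) - part_lines.length + 1) 1)

-- ===== PORT B =====
-- sig(s) = len(s)
def pvSig (s : String) : Int := PySem.Str.len s

-- the while-True loop; `shifts` is the list the Python iterator walks through
def pvBGo (whole part repl : List String) (target : Int) : Int → Int → List (Int × Int) → Option String
  | i, h, shifts =>
    if h = target ∧ PySem.List.slice whole (some i) (some (i + (part.length : Int))) = part then
      some (PySem.Str.join "" (PySem.List.slice whole none (some i) ++ repl ++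
        PySem.List.slice whole (some (i + (part.length : Int))) none))
    else
      match shifts with
      | [] => none
      | (outS, inS) :: rest => pvBGo whole part repl target (i + 1) (h + (inS - outS)) rest

def perfect_replace_alt (whole_lines : List String) (part_lines : List String) (replace_lines : List String) : Option String :=
  let part_len := part_lines.length
  if (part_len : Int) > (whole_lines.length : Int) then none
  else
    let target := (part_lines.map pvSig).sum
    let sigs := whole_lines.map pvSig
    let h := (PySem.List.slice sigs none (some (part_len : Int))).sum
    pvBGo whole_lines part_lines replace_lines target 0 h
      (sigs.zip (PySem.List.slice sigs (some (part_len : Int)) none))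

-- ===== PRECONDITION & SPEC =====
def Spec_perfect_replace (whole_lines : List String) (part_lines : List String) (replace_lines : List String) (out : Option String) : Prop := out = perfect_replace_alt whole_lines part_lines replace_lines
instance (whole_lines : List String) (part_lines : List String) (replace_lines : List String) (out : Option String) : Decidable (Spec_perfect_replace whole_lines part_lines replace_lines out) := by unfold Spec_perfect_replace; infer_instance

-- ===== CLAIM (what is proved, stated in full; the proofs are below) =====
def Claim_equal_perfect_replace : Prop := ∀ (whole_lines : List String) (part_lines : List String) (replace_lines : List String), Dom_perfect_replace whole_lines part_lines replace_lines → Spec_perfect_replace whole_lines part_lines replace_lines (perfect_replace whole_lines part_lines replace_lines)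

-- ===== LEMMAS AND PROOFS =====

-- equal windows have equal signatures: the extra `h = target` conjunct in B is redundant
-- exactly when h is the signature sum of the current window
lemma pvSig_window (w p : List String) (i : Nat)
    (hwin : (w.drop i).take p.length = p) :
    (((w.map pvSig).drop i).take p.length).sum = (p.map pvSig).sum := by
  rw [← List.map_drop, ← List.map_take, hwin]

-- rolling update: subtracting the leaving signature and adding the entering one
-- shifts the window sum by one position
lemma pvRoll (L : List Int) (i k : Nat) (hik : i + k < L.length) :
    ((L.drop i).take k).sum + (L[i + k]'hik - L[i]'(by omega)) = ((L.drop (i + 1)).take k).sum := by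
  have hd : L.drop i = L[i]'(by omega) :: L.drop (i + 1) := List.drop_eq_getElem_cons (by omega)
  have h1 : (L.drop i).take (k + 1) = L[i]'(by omega) :: (L.drop (i + 1)).take k := by
    rw [hd, List.take_succ_cons]
  have h2 : (L.drop i).take (k + 1) = (L.drop i).take k ++ [L[i + k]'hik] := by
    rw [List.take_add_one]
    have hk : k < (L.drop i).length := by simp; omega
    simp [List.getElem?_eq_getElem hk]
  have := congrArg List.sum h2
  rw [h1] at this
  simp at this
  omega

-- main loop correspondence: starting at position i with the correct window signature,
-- A's remaining range scan and B's remaining rolling scan agree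
lemma pvGo_eq (w p r : List String) :
    ∀ (j i : Nat), i + p.length ≤ w.length → w.length - (i + p.length) = j →
    pvAGo w p r (PySem.List.pyRange (i : Int) ((w.length : Int) - p.length + 1) 1)
      = pvBGo w p r ((p.map pvSig).sum) (i : Int)
          ((((w.map pvSig).drop i).take p.length).sum)
          (((w.map pvSig).drop i).zip ((w.map pvSig).drop (i + p.length))) := by
  intro j
  induction j with
  | zero =>
      intro i hik hj
      have hieq : i + p.length = w.length := by omega
      have hcons : PySem.List.pyRange (i : Int) ((w.length : Int) - p.length + 1) 1
          = (i : Int) :: PySem.List.pyRange ((i : Int) + 1) ((w.length : Int) - p.length + 1) 1 :=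
        PySem.List.pyRange_one_cons (by omega)
      have hnil : PySem.List.pyRange ((i : Int) + 1) ((w.length : Int) - p.length + 1) 1 = [] :=
        PySem.List.pyRange_one_eq_nil (by omega)
      have hzip : ((w.map pvSig).drop i).zip ((w.map pvSig).drop (i + p.length))
          = [] := by
        have : (w.map pvSig).drop (i + p.length) = [] := by
          apply List.drop_eq_nil_of_le; simp [hieq]
        simp [this]
      rw [hcons, hnil, hzip, pvAGo, pvBGo]
      by_cases hwin : PySem.List.slice w (some (i : Int)) (some ((i : Int) + (p.length : Int))) = p
      · have hsum : (((w.map pvSig).drop i).take p.length).sum = (p.map pvSig).sum := by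
          apply pvSig_window
          rw [← PySem.List.slice_natCast_add]; exact hwin
        simp [hwin, hsum]
      · simp [hwin, pvAGo]
  | succ j ih =>
      intro i hik hj
      have hlt : i + p.length < w.length := by omega
      have hcons : PySem.List.pyRange (i : Int) ((w.length : Int) - p.length + 1) 1
          = (i : Int) :: PySem.List.pyRange ((i : Int) + 1) ((w.length : Int) - p.length + 1) 1 :=
        PySem.List.pyRange_one_cons (by omega)
      set L := w.map pvSig with hL
      have hlenL : L.length = w.length := by simp [hL]
      have hdi : L.drop i = L[i]'(by omega) :: L.drop (i + 1) := List.drop_eq_getElem_cons (by omega)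
      have hdk : L.drop (i + p.length) = L[i + p.length]'(by omega) :: L.drop (i + p.length + 1) :=
        List.drop_eq_getElem_cons (by omega)
      have hzip : (L.drop i).zip (L.drop (i + p.length))
          = (L[i]'(by omega), L[i + p.length]'(by omega)) ::
            (L.drop (i + 1)).zip (L.drop (i + 1 + p.length)) := by
        have h13 : i + p.length + 1 = i + 1 + p.length := by omega
        rw [hdi, hdk, List.zip_cons_cons, h13]
      rw [hcons, hzip, pvAGo, pvBGo]
      by_cases hwin : PySem.List.slice w (some (i : Int)) (some ((i : Int) + (p.length : Int))) = p
      · have hsum : ((L.drop i).take p.length).sum = (p.map pvSig).sum := by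
          apply pvSig_window
          rw [← PySem.List.slice_natCast_add]; exact hwin
        simp [hwin, hsum]
      · have hroll : ((L.drop i).take p.length).sum +
            (L[i + p.length]'(by omega) - L[i]'(by omega)) = ((L.drop (i + 1)).take p.length).sum :=
          pvRoll L i p.length (by omega)
        have hrec := ih (i + 1) (by omega) (by omega)
        rw [if_neg hwin, if_neg (fun hc => hwin hc.2), hroll]
        have hcast : ((i : Int) + 1) = ((i + 1 : Nat) : Int) := by push_cast; ring
        rw [hcast]
        exact hrec

-- ===== VERDICT (by name: the statement is the Claim_ definition above) =====
theorem perfect_replace_spec : Claim_equal_perfect_replace := by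
  intro w p r _
  unfold Spec_perfect_replace perfect_replace perfect_replace_alt
  by_cases hk : (p.length : Int) > (w.length : Int)
  · have hnil : PySem.List.pyRange 0 ((w.length : Int) - p.length + 1) 1 = [] :=
      PySem.List.pyRange_one_eq_nil (by omega)
    simp [hnil, hk, pvAGo]
  · have hle : p.length ≤ w.length := by omega
    simp only [hk, if_false]
    have h0 := pvGo_eq w p r (w.length - p.length) 0 (by omega) (by omega)
    rw [PySem.List.slice_to_natCast, PySem.List.slice_from_natCast]
    simpa using h0
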